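-- pv_equiv track=rewrite | github.com/thaole-cpu/web3 | career_guidance_website/flask backend/app.py | find_majors
-- ===== SOURCE A (Python) =====
-- def find_majors(mbti_type, major_data):
--     unique_majors = set()
--     majors = []
--     for major in major_data:
--         if mbti_type in major["mbti_type"].split(", "):
--             major_name = major["majors"]
--             if major_name not in unique_majors:
--                 unique_majors.add(major_name)
--                 majors.append(major_name)
--     return majors
-- ===== SOURCE B (Python) =====
-- def find_majors(mbti_type, major_data):
--     def matches(m):
--         return mbti_type in m["mbti_type"].split(", ")
--
--     result = []
--     for i, m in enumerate(major_data):
--         if matches(m) and not any(matches(p) and p["majors"] == m["majors"]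
--                                   for p in major_data[:i]):
--             result.append(m["majors"])
--     return result
-- ===== Notes on version B (the rewrite author's own statement) =====
-- stated objective: alternative
-- what changed: Drops A's auxiliary seen-set entirely: B decides first occurrence by a brute-force rescan of the already-processed prefix (a record's name is emitted iff no earlier matching record carries the same name), trading A's maintained state for an O(n^2) stateless nested scan.
import Mathlib
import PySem

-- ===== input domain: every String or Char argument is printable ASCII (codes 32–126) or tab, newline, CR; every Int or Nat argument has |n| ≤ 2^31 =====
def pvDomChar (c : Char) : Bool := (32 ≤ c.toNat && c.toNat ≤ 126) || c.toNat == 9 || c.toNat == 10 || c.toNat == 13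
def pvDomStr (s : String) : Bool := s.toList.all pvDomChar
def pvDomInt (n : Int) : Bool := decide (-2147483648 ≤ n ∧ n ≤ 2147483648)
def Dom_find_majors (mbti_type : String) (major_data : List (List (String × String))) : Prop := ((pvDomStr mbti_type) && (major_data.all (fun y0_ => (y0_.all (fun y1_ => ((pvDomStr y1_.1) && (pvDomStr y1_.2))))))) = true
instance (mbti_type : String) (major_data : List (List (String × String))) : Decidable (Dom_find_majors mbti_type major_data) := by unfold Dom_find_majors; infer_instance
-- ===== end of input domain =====

-- B drops A's maintained seen-set: it decides first occurrence by rescanning the already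
-- processed prefix of the input (stateless nested scan); objective: alternative (O(n^2) vs O(n)).


-- shared dict-access primitive: first-match association-list lookup, "" outside Pre_ (Python raises KeyError there)
def pvGetD (m : List (String × String)) (k : String) : String :=
  ((m.find? (fun p => p.1 == k)).map (·.2)).getD ""

-- shared condition: mbti_type in major["mbti_type"].split(", ")
def pvMatch (mbti_type : String) (m : List (String × String)) : Bool :=
  ((PySem.Str.split? (pvGetD m "mbti_type") ", ").getD []).contains mbti_type

-- ===== PORT A =====
def find_majors (mbti_type : String) (major_data : List (List (String × String))) : List String :=
  (major_data.foldl (fun (st : PySem.Set String × List String) major =>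
    if pvMatch mbti_type major then
      let major_name := pvGetD major "majors"
      if PySem.Set.contains st.1 major_name then st
      else (PySem.Set.add st.1 major_name, st.2 ++ [major_name])
    else st) (PySem.Set.empty, [])).2

-- ===== PORT B =====
-- major_data[:i] with the nonnegative enumerate index i is exactly 'take i.toNat'
def find_majors_alt (mbti_type : String) (major_data : List (List (String × String))) : List String :=
  (PySem.List.enumerate major_data).foldl (fun result im =>
    if pvMatch mbti_type im.2 &&
       !((major_data.take im.1.toNat).any (fun p =>
           pvMatch mbti_type p && (pvGetD p "majors" == pvGetD im.2 "majors")))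
    then result ++ [pvGetD im.2 "majors"]
    else result) []

-- ===== PRECONDITION & SPEC =====
-- Pre_ excludes exactly the inputs on which Python A raises KeyError: a dict missing the
-- "mbti_type" key, or a matching dict missing the "majors" key.
def Pre_find_majors (mbti_type : String) (major_data : List (List (String × String))) : Prop :=
  ∀ m ∈ major_data,
    (m.find? (fun p => p.1 == "mbti_type")).isSome = true ∧
    (pvMatch mbti_type m = true → (m.find? (fun p => p.1 == "majors")).isSome = true)
instance (mbti_type : String) (major_data : List (List (String × String))) : Decidable (Pre_find_majors mbti_type major_data) := by unfold Pre_find_majors; infer_instance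

def pvWitness_find_majors : String × (List (List (String × String))) :=
  ("INTJ", [[("mbti_type", "INTJ, ENTP"), ("majors", "Computer Science")],
            [("mbti_type", "ESFP"), ("majors", "Arts")],
            [("mbti_type", "INTJ"), ("majors", "Computer Science")]])

def Spec_find_majors (mbti_type : String) (major_data : List (List (String × String))) (out : List String) : Prop := out = find_majors_alt mbti_type major_data
instance (mbti_type : String) (major_data : List (List (String × String))) (out : List String) : Decidable (Spec_find_majors mbti_type major_data out) := by unfold Spec_find_majors; infer_instance

-- ===== CLAIM (what is proved, stated in full; the proofs are below) =====
def Claim_equal_find_majors : Prop := ∀ (mbti_type : String) (major_data : List (List (String × String))), Dom_find_majors mbti_type major_data → Pre_find_majors mbti_type major_data → Spec_find_majors mbti_type major_data (find_majors mbti_type major_data)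

-- ===== LEMMAS AND PROOFS =====

-- the list of names of all matching records, in order (with multiplicities)
def pvNames (t : String) (md : List (List (String × String))) : List String :=
  (md.filter (fun m => pvMatch t m)).map (fun m => pvGetD m "majors")

-- A's loop from a duplicated state s: its output component is folding Set.add over pvNames
lemma find_majors_loop_eq (t : String) (md : List (List (String × String)))
    (s : PySem.Set String) :
    (md.foldl (fun (st : PySem.Set String × List String) major =>
      if pvMatch t major then
        let major_name := pvGetD major "majors"
        if PySem.Set.contains st.1 major_name then st
        else (PySem.Set.add st.1 major_name, st.2 ++ [major_name])
      else st) (s, s)).2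
    = (pvNames t md).foldl PySem.Set.add s := by
  induction md generalizing s with
  | nil => simp [pvNames]
  | cons m md ih =>
    by_cases hm : pvMatch t m = true
    · by_cases hc : pvGetD m "majors" ∈ s
      · have hadd : PySem.Set.add s (pvGetD m "majors") = s := PySem.Set.add_of_mem hc
        simpa [pvNames, hm, hc, hadd] using ih s
      · have hadd : PySem.Set.add s (pvGetD m "majors") = s ++ [pvGetD m "majors"] :=
          PySem.Set.add_of_not_mem hc
        simpa [pvNames, hm, hc, hadd] using ih (s ++ [pvGetD m "majors"])
    · simpa [pvNames, hm] using ih s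

-- A = first-occurrence dedup of pvNames
lemma find_majors_eq_dedup (t : String) (md : List (List (String × String))) :
    find_majors t md = PySem.List.dedup (pvNames t md) := by
  rw [PySem.List.dedup_eq_ofList, PySem.Set.ofList_eq_foldl]
  exact find_majors_loop_eq t md PySem.Set.empty

lemma enumerate_append_singleton {α : Type} (xs : List α) (m : α) (s : Int) :
    PySem.List.enumerate (xs ++ [m]) s
      = PySem.List.enumerate xs s ++ [(s + xs.length, m)] := by
  induction xs generalizing s with
  | nil => simp [PySem.List.enumerate_cons]
  | cons x xs ih =>
    simp [PySem.List.enumerate_cons, ih (s + 1)]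
    ring_nf

-- B's prefix rescan over md decides exactly membership in pvNames t md
lemma any_eq_mem_pvNames (t : String) (md : List (List (String × String))) (name : String) :
    (md.any (fun p => pvMatch t p && (pvGetD p "majors" == name)))
      = decide (name ∈ pvNames t md) := by
  induction md with
  | nil => simp [pvNames]
  | cons p md ih =>
    rw [List.any_cons, ih]
    by_cases hp : pvMatch t p = true
    · rw [show pvNames t (p :: md) = pvGetD p "majors" :: pvNames t md from by
        simp [pvNames, hp]]
      by_cases he : pvGetD p "majors" = name
      · simp [hp, he]
      · simp [hp, he, Ne.symm he]
    · rw [show pvNames t (p :: md) = pvNames t md from by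
        simp [pvNames, hp]]
      simp [hp]

-- B = first-occurrence dedup of pvNames
lemma find_majors_alt_eq_dedup (t : String) (md : List (List (String × String))) :
    find_majors_alt t md = PySem.List.dedup (pvNames t md) := by
  induction md using List.reverseRecOn with
  | nil => rfl
  | append_singleton md m ih =>
    have hcong : ∀ (acc : List String), ∀ im ∈ PySem.List.enumerate md,
        (if pvMatch t im.2 &&
            !(((md ++ [m]).take im.1.toNat).any (fun p =>
                pvMatch t p && (pvGetD p "majors" == pvGetD im.2 "majors")))
         then acc ++ [pvGetD im.2 "majors"] else acc)
        = (if pvMatch t im.2 &&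
            !((md.take im.1.toNat).any (fun p =>
                pvMatch t p && (pvGetD p "majors" == pvGetD im.2 "majors")))
         then acc ++ [pvGetD im.2 "majors"] else acc) := by
      intro acc im him
      have hfst : im.1 ∈ PySem.List.pyRange 0 (0 + (md.length : Int)) := by
        have := List.mem_map_of_mem (f := fun x : Int × List (String × String) => x.1) him
        rwa [PySem.List.map_fst_enumerate] at this
      have hlt : im.1 < md.length := by
        have := PySem.List.mem_pyRange_one.mp hfst
        omega
      rw [List.take_append_of_le_length (by omega : im.1.toNat ≤ md.length)]
    unfold find_majors_alt
    rw [enumerate_append_singleton, List.foldl_append,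
        PySem.List.foldl_congr_mem _ _ _ _ hcong]
    have hmd : find_majors_alt t md
        = (PySem.List.enumerate md).foldl (fun result im =>
            if pvMatch t im.2 &&
              !((md.take im.1.toNat).any (fun p =>
                  pvMatch t p && (pvGetD p "majors" == pvGetD im.2 "majors")))
            then result ++ [pvGetD im.2 "majors"] else result) [] := rfl
    rw [← hmd, ih]
    have htake : (md ++ [m]).take (((0 : Int) + (md.length : Int)).toNat) = md := by
      simp
    rw [List.foldl_cons, List.foldl_nil, htake]
    have hnames : pvNames t (md ++ [m])
        = pvNames t md ++ (if pvMatch t m then [pvGetD m "majors"] else []) := by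
      by_cases hm : pvMatch t m = true <;> simp [pvNames, hm]
    rw [hnames]
    by_cases hm : pvMatch t m = true
    · rw [any_eq_mem_pvNames]
      by_cases hmem : pvGetD m "majors" ∈ pvNames t md
      · have hdd : PySem.List.dedup (pvNames t md ++ [pvGetD m "majors"])
            = PySem.List.dedup (pvNames t md) := by
          rw [PySem.List.dedup_eq_ofList, PySem.List.dedup_eq_ofList,
              PySem.Set.ofList_eq_foldl, PySem.Set.ofList_eq_foldl, List.foldl_append,
              List.foldl_cons, List.foldl_nil,
              PySem.Set.add_of_mem (by
                rw [← PySem.Set.ofList_eq_foldl]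
                exact (PySem.Set.mem_ofList _ _).mpr hmem)]
        have hcond : (pvMatch t m &&
            !decide (pvGetD m "majors" ∈ pvNames t md)) = false := by simp [hm, hmem]
        rw [hcond]
        simp [hm]
        exact hdd.symm
      · have hdd : PySem.List.dedup (pvNames t md ++ [pvGetD m "majors"])
            = PySem.List.dedup (pvNames t md) ++ [pvGetD m "majors"] := by
          rw [PySem.List.dedup_eq_ofList, PySem.List.dedup_eq_ofList,
              PySem.Set.ofList_eq_foldl, PySem.Set.ofList_eq_foldl, List.foldl_append,
              List.foldl_cons, List.foldl_nil,
              PySem.Set.add_of_not_mem (by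
                rw [← PySem.Set.ofList_eq_foldl]
                exact fun h => hmem ((PySem.Set.mem_ofList _ _).mp h))]
        have hcond : (pvMatch t m &&
            !decide (pvGetD m "majors" ∈ pvNames t md)) = true := by simp [hm, hmem]
        rw [hcond]
        simp [hm]
        exact hdd.symm
    · simp [hm]

-- ===== VERDICT (by name: the statement is the Claim_ definition above) =====
theorem find_majors_spec : Claim_equal_find_majors := by
  intro t md _ _
  unfold Spec_find_majors
  rw [find_majors_eq_dedup, find_majors_alt_eq_dedup]
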